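-- pv_equiv track=rewrite | github.com/Zidoing/programer_interview_guide | first/1.3-reverse.py | getLastItem
-- ===== SOURCE A (Python) =====
-- def getLastItem(stack):
--     item = stack.pop()
--
--     if not stack:
--         return item
--     else:
--         last = getLastItem(stack)
--         stack.append(item)
--
--     return last
-- ===== SOURCE B (Python) =====
-- def getLastItem(stack):
--     return stack.pop(0)
-- ===== Notes on version B (the rewrite author's own statement) =====
-- stated objective: simpler
-- what changed: Replaces A's recursive pop-all-then-reappend scheme with a single direct front removal stack.pop(0).
import Mathlib
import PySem

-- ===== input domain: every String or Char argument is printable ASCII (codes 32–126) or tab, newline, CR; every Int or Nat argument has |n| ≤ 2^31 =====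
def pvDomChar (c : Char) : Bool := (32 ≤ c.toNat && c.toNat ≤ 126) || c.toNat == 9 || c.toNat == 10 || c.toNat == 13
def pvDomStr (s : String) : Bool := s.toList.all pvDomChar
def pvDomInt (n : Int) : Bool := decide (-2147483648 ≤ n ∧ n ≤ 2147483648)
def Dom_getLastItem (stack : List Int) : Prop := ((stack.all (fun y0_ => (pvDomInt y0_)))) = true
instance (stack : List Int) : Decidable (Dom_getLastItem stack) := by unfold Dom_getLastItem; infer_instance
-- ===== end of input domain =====

-- B replaces A's recursive pop-everything-and-reappend with a direct front removal
-- stack.pop(0) (objective: simpler). Both mutate the caller's list identically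
-- (the first element is removed); the proof is about the return value.


-- ===== PORT A =====
-- item = stack.pop() takes the last element (IndexError on [] — excluded by Pre_);
-- the recursion continues on the remaining prefix; the re-append does not affect the return value.
def getLastItem (stack : List Int) : Int :=
  match h : stack.getLast? with
  | none => 0  -- stack.pop() raises IndexError here; outside Pre_
  | some item =>
    let rest := stack.dropLast
    if rest = [] then item else getLastItem rest
termination_by stack.length
decreasing_by
  cases stack with
  | nil => simp at h
  | cons a l => simp [List.length_dropLast]

-- ===== PORT B =====
-- stack.pop(0): remove and return the first element (IndexError on [] — outside Pre_).
def getLastItem_alt (stack : List Int) : Int :=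
  match PySem.List.pop? stack 0 with
  | none => 0  -- IndexError; outside Pre_
  | some (item, _) => item

-- ===== PRECONDITION & SPEC =====
-- Pre_ excludes the empty list, on which both A's stack.pop() and B's stack.pop(0) raise IndexError.
def Pre_getLastItem (stack : List Int) : Prop := stack ≠ []
instance (stack : List Int) : Decidable (Pre_getLastItem stack) := by unfold Pre_getLastItem; infer_instance
def pvWitness_getLastItem : List Int := [3, 1, 2]

def Spec_getLastItem (stack : List Int) (out : Int) : Prop := out = getLastItem_alt stack
instance (stack : List Int) (out : Int) : Decidable (Spec_getLastItem stack out) := by unfold Spec_getLastItem; infer_instance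

-- ===== CLAIM (what is proved, stated in full; the proofs are below) =====
def Claim_equal_getLastItem : Prop := ∀ (stack : List Int), Dom_getLastItem stack → Pre_getLastItem stack → Spec_getLastItem stack (getLastItem stack)

-- ===== LEMMAS AND PROOFS =====

-- On a nonempty stack, A's recursion returns the head (bottom) element.
theorem getLastItem_eq_head_aux : ∀ (n : Nat) (l : List Int), l.length ≤ n →
    ∀ x : Int, getLastItem (x :: l) = x := by
  intro n
  induction n with
  | zero =>
    intro l hl x
    have : l = [] := List.eq_nil_of_length_eq_zero (Nat.le_zero.mp hl)
    subst this
    simp [getLastItem]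
  | succ n ih =>
    intro l hl x
    cases l with
    | nil => simp [getLastItem]
    | cons b m =>
      rw [getLastItem]
      have h1 : (x :: b :: m).getLast? = some ((b :: m).getLast (by simp)) := by
        simp [List.getLast?_eq_some_getLast]
      rw [h1]
      have h2 : (x :: b :: m).dropLast = x :: (b :: m).dropLast := by
        simp [List.dropLast]
      simp only [h2]
      rw [if_neg (by simp)]
      exact ih ((b :: m).dropLast) (by simp [List.length_dropLast] at *; omega) x

theorem getLastItem_eq_head (l : List Int) (x : Int) : getLastItem (x :: l) = x :=
  getLastItem_eq_head_aux l.length l (le_refl _) x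

-- ===== VERDICT (by name: the statement is the Claim_ definition above) =====
theorem getLastItem_spec : Claim_equal_getLastItem := by
  intro stack _ hpre
  unfold Spec_getLastItem
  cases stack with
  | nil => exact absurd rfl hpre
  | cons x l =>
    rw [getLastItem_eq_head l x]
    simp [getLastItem_alt, PySem.List.pop?, PySem.List.pyIdx?]
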